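-- pv_equiv track=rewrite | github.com/santicr/Competitive-Programming | Google/p1.py | solution
-- ===== SOURCE A (Python) =====
-- def divide(s, j):
-- 	i = j
-- 	st = s[0:j]
-- 	while(i < len(s)):
-- 		if(s[i:j + i] != st):
-- 			return False
-- 		i += j
-- 	return True
--
-- def solution(s):
-- 	cads = []
--
-- 	for i in range(len(s)):
-- 		cads.append(s[i:len(s) + i] + s[0:i])
--
-- 	ans = -1
-- 	for j in range(len(cads)):
-- 		for i in range(1, len(s) + 1):
-- 			if(len(s) % i == 0):
-- 				if(divide(s, i)):
-- 					ans = max((len(s)//i), ans)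
-- 					break
-- 	return ans
-- ===== SOURCE B (Python) =====
-- def solution(s):
--     # Max repetitions of the smallest repeating unit: scan divisors once,
--     # testing periodicity by the shift trick s[d:] == s[:n-d] (no rotations,
--     # no chunk-by-chunk helper, no redundant outer repetition).
--     n = len(s)
--     if n == 0:
--         return -1
--     for d in range(1, n + 1):
--         if n % d == 0 and s[d:] == s[:n - d]:
--             return n // d
-- ===== Notes on version B (the rewrite author's own statement) =====
-- stated objective: faster
-- what changed: B drops A's list of n rotations and the outer loop that repeats the identical divisor search n times, and replaces the chunk-by-chunk divide() helper with a single shift-equality test s[d:] == s[:n-d] per divisor, returning at the first (smallest) periodic divisor.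
import Mathlib
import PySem

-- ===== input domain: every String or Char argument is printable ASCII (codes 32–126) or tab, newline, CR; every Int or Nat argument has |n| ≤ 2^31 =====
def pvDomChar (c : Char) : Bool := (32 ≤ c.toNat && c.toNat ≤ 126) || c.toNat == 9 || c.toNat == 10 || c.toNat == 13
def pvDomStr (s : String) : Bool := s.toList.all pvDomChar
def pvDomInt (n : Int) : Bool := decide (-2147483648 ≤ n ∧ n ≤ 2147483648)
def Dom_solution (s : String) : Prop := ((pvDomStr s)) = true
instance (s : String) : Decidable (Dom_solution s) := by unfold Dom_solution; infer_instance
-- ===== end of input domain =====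

-- B replaces A's rotation list, n-fold-repeated divisor search and chunkwise divide()
-- helper by a single divisor scan with a shift-equality periodicity test (objective: faster).

-- ===== PORT A =====
-- while(i < len(s)): if(s[i:j+i] != st): return False; i += j    -- j = 0 guard only for
-- totality: solution calls divide with j ≥ 1 only (Python would loop forever for j = 0).
def divideAux (cs st : List Char) (j i : Nat) : Bool :=
  if j = 0 then true
  else if i < cs.length then
    if PySem.List.slice cs (some (i : Int)) (some ((j + i : Nat) : Int)) ≠ st then false
    else divideAux cs st j (i + j)
  else true
termination_by cs.length - i
decreasing_by omega

def divide (cs : List Char) (j : Nat) : Bool :=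
  divideAux cs (PySem.List.slice cs (some 0) (some (j : Int))) j j

-- for i in range(1, len(s)+1): if len(s)%i==0: if divide(s,i): ans=max(len(s)//i, ans); break
-- (len(s)//i is floor division of nonnegative ints = Nat division, cast to Int)
def innerLoop (cs : List Char) (i : Nat) (ans : Int) : Int :=
  if i < cs.length + 1 then
    if cs.length % i = 0 then
      if divide cs i then max ((cs.length / i : Nat) : Int) ans
      else innerLoop cs (i + 1) ans
    else innerLoop cs (i + 1) ans
  else ans
termination_by cs.length + 1 - i
decreasing_by all_goals omega

def solution (s : String) : Int :=
  let cs := s.toList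
  let cads := (List.range cs.length).map
    (fun (i : Nat) => PySem.List.slice cs (some (i : Int)) (some (Int.ofNat (cs.length + i)))
              ++ PySem.List.slice cs (some 0) (some (i : Int)))
  (List.range cads.length).foldl (fun ans _j => innerLoop cs 1 ans) (-1)

-- ===== PORT B =====
-- for d in range(1, n+1): if n % d == 0 and s[d:] == s[:n-d]: return n // d
-- the fall-off branch (else 0) is unreachable: d = n always passes the test.
def altLoop (cs : List Char) (d : Nat) : Int :=
  if d < cs.length + 1 then
    if cs.length % d = 0 ∧ PySem.List.slice cs (some (d : Int)) none
        = PySem.List.slice cs none (some ((cs.length - d : Nat) : Int)) then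
      ((cs.length / d : Nat) : Int)
    else altLoop cs (d + 1)
  else 0
termination_by cs.length + 1 - d
decreasing_by omega

def solution_alt (s : String) : Int :=
  let cs := s.toList
  if cs.length = 0 then -1 else altLoop cs 1

-- ===== PRECONDITION & SPEC =====
def Spec_solution (s : String) (out : Int) : Prop := out = solution_alt s
instance (s : String) (out : Int) : Decidable (Spec_solution s out) := by unfold Spec_solution; infer_instance

-- ===== CLAIM (what is proved, stated in full; the proofs are below) =====
def Claim_equal_solution : Prop := ∀ (s : String), Dom_solution s → Spec_solution s (solution s)

-- ===== LEMMAS AND PROOFS =====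

-- cs has period j on its whole length
def Per (cs : List Char) (j : Nat) : Prop := ∀ k, k + j < cs.length → cs[k + j]? = cs[k]?

theorem chunk_getElem? (cs : List Char) (m j r : Nat) :
    ((cs.drop m).take j)[r]? = if r < j then cs[m + r]? else none := by
  rcases Nat.lt_or_ge r j with h | h
  · simp [List.getElem?_take_of_lt h, List.getElem?_drop, h]
  · simp [List.getElem?_take, h, Nat.not_lt.mpr h]

theorem divideAux_iff (cs st : List Char) (j : Nat) (hj : 0 < j) :
    ∀ fuel i, cs.length ≤ i + fuel →
      (divideAux cs st j i = true ↔
        ∀ t, i + t * j < cs.length → (cs.drop (i + t * j)).take j = st) := by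
  intro fuel
  induction fuel with
  | zero =>
      intro i hi
      rw [divideAux]
      simp only [Nat.pos_iff_ne_zero.mp hj, if_false]
      have : ¬ i < cs.length := by omega
      simp only [this, if_false, true_iff]
      intro t ht; omega
  | succ f ih =>
      intro i hi
      rw [divideAux]
      simp only [Nat.pos_iff_ne_zero.mp hj, if_false]
      by_cases hlt : i < cs.length
      · simp only [hlt, if_true]
        have hslice : PySem.List.slice cs (some (i : Int)) (some ((j + i : Nat) : Int))
            = (cs.drop i).take j := by
          rw [PySem.List.slice_natCast]
          congr 1
          omega
        rw [hslice]
        by_cases hc : (cs.drop i).take j = st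
        · simp only [hc, ne_eq, not_true_eq_false, if_false]
          rw [ih (i + j) (by omega)]
          constructor
          · intro h t ht
            rcases t with _ | t'
            · simpa using hc
            · have harith : i + (t' + 1) * j = i + j + t' * j := by ring
              rw [harith] at ht ⊢
              exact h t' ht
          · intro h t ht
            have harith : i + j + t * j = i + (t + 1) * j := by ring
            rw [harith] at ht ⊢
            exact h (t + 1) ht
        · rw [if_pos hc]
          simp only [Bool.false_eq_true, false_iff]
          push_neg
          exact ⟨0, by simpa using hlt, by simpa using hc⟩
      · simp only [hlt, if_false, true_iff]
        intro t ht; omega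

-- all aligned chunks equal the first chunk
def Chunks (cs : List Char) (j : Nat) : Prop :=
  ∀ t, t * j < cs.length → (cs.drop (t * j)).take j = cs.take j

theorem chunks_iff_per (cs : List Char) (j : Nat) (hj : 0 < j) (hd : j ∣ cs.length) :
    Chunks cs j ↔ Per cs j := by
  obtain ⟨c, hc⟩ := hd
  constructor
  · intro h k hk
    set t := k / j with htdef
    have hr : j * t + k % j = k := Nat.div_add_mod k j
    have hrlt : k % j < j := Nat.mod_lt _ hj
    set r := k % j
    have hmul : t * j = j * t := Nat.mul_comm t j
    have h1 : t * j < cs.length := by omega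
    have h2 : (t + 1) * j < cs.length := by
      have : (t + 1) * j = t * j + j := by ring
      omega
    have e1 := congrArg (fun l => l[r]?) (h t h1)
    have e2 := congrArg (fun l => l[r]?) (h (t + 1) h2)
    simp only [chunk_getElem?, hrlt, if_true] at e1 e2
    rw [List.getElem?_take_of_lt hrlt] at e1 e2
    have k1 : t * j + r = k := by omega
    have k2 : (t + 1) * j + r = k + j := by
      have : (t + 1) * j = t * j + j := by ring
      omega
    rw [k1] at e1
    rw [k2] at e2
    rw [e1, e2]
  · intro hper t
    induction t with
    | zero => intro _; simp
    | succ t' ih =>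
        intro h1
        have h0 : t' * j < cs.length := by
          have : t' * j < (t' + 1) * j := by
            have : (t' + 1) * j = t' * j + j := by ring
            omega
          omega
    -- (t'+2)*j ≤ cs.length from divisibility
        have hcle : (t' + 2) * j ≤ cs.length := by
          have hcc : cs.length = c * j := by rw [hc]; ring
          have ht1 : t' + 1 < c := by
            by_contra hcon
            have : c ≤ t' + 1 := by omega
            have : c * j ≤ (t' + 1) * j := mul_le_mul_right' this j
            omega
          have : (t' + 2) * j ≤ c * j := mul_le_mul_right' (by omega) j
          omega
        have hshift : (cs.drop ((t' + 1) * j)).take j = (cs.drop (t' * j)).take j := by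
          apply List.ext_getElem?
          intro r
          rw [chunk_getElem?, chunk_getElem?]
          by_cases hr : r < j
          · simp only [hr, if_true]
            have : (t' * j + r) + j < cs.length := by
              have : (t' + 2) * j = t' * j + j + j := by ring
              omega
            have := hper (t' * j + r) this
            have harith : t' * j + r + j = (t' + 1) * j + r := by ring
            rwa [harith] at this
          · simp [hr]
        rw [hshift]
        exact ih h0

theorem divide_iff (cs : List Char) (j : Nat) (hj : 0 < j) (hd : j ∣ cs.length) :
    divide cs j = true ↔ Per cs j := by
  rw [← chunks_iff_per cs j hj hd]
  unfold divide
  have hst : PySem.List.slice cs (some 0) (some (j : Int)) = cs.take j := by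
    rw [PySem.List.slice_zero_start, PySem.List.slice_to_natCast]
  rw [hst, divideAux_iff cs (cs.take j) j hj cs.length j (by omega)]
  constructor
  · intro h t ht
    rcases t with _ | t'
    · simp
    · have harith : (t' + 1) * j = j + t' * j := by ring
      rw [harith] at ht ⊢
      exact h t' ht
  · intro h t ht
    have harith : j + t * j = (t + 1) * j := by ring
    rw [harith] at ht ⊢
    exact h (t + 1) ht

theorem dropTake_iff (cs : List Char) (j : Nat) (hj : 0 < j) (hle : j ≤ cs.length) :
    cs.drop j = cs.take (cs.length - j) ↔ Per cs j := by
  constructor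
  · intro h k hk
    have := congrArg (fun l => l[k]?) h
    simp only [List.getElem?_drop] at this
    rw [List.getElem?_take_of_lt (by omega : k < cs.length - j)] at this
    rw [Nat.add_comm j k] at this
    exact this
  · intro hper
    apply List.ext_getElem?
    intro k
    rw [List.getElem?_drop]
    by_cases hk : k < cs.length - j
    · rw [List.getElem?_take_of_lt hk]
      have := hper k (by omega)
      rwa [Nat.add_comm k j] at this
    · rw [List.getElem?_eq_none (by omega : cs.length ≤ j + k),
          List.getElem?_eq_none (by simp [List.length_take]; omega)]

-- the two loop tests agree, divisor by divisor
theorem test_iff (cs : List Char) (i : Nat) (hi : 0 < i) (hle : i ≤ cs.length)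
    (hmod : cs.length % i = 0) :
    divide cs i = true ↔
      PySem.List.slice cs (some (i : Int)) none
        = PySem.List.slice cs none (some ((cs.length - i : Nat) : Int)) := by
  rw [PySem.List.slice_from_natCast, PySem.List.slice_to_natCast]
  rw [divide_iff cs i hi (Nat.dvd_of_mod_eq_zero hmod), dropTake_iff cs i hi hle]

theorem test_at_len (cs : List Char) (hn : 0 < cs.length) :
    cs.length % cs.length = 0 ∧ PySem.List.slice cs (some (cs.length : Int)) none
      = PySem.List.slice cs none (some ((cs.length - cs.length : Nat) : Int)) := by
  refine ⟨Nat.mod_self _, ?_⟩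
  rw [PySem.List.slice_from_natCast, PySem.List.slice_to_natCast]
  simp

theorem inner_eq_max (cs : List Char) :
    ∀ fuel i, cs.length + 1 ≤ i + fuel → 0 < i → i ≤ cs.length →
      ∀ ans, innerLoop cs i ans = max (altLoop cs i) ans := by
  intro fuel
  induction fuel with
  | zero => intro i hfi hi hle ans; omega
  | succ f ih =>
      intro i hfi hi hle ans
      rw [innerLoop, altLoop]
      have hlt : i < cs.length + 1 := by omega
      simp only [hlt, if_true]
      by_cases hmod : cs.length % i = 0
      · simp only [hmod, if_true, true_and]
        by_cases hdiv : divide cs i = true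
        · rw [if_pos hdiv, if_pos ((test_iff cs i hi hle hmod).mp hdiv)]
        · rw [if_neg hdiv, if_neg (fun hc => hdiv ((test_iff cs i hi hle hmod).mpr hc))]
          have hin : i < cs.length := by
            rcases Nat.lt_or_ge i cs.length with h | h
            · exact h
            · exfalso
              have hieq : i = cs.length := by omega
              apply hdiv
              rw [hieq, test_iff cs cs.length (by omega) (le_refl _) (Nat.mod_self _)]
              exact (test_at_len cs (by omega)).2
          exact ih (i + 1) (by omega) (by omega) (by omega) ans
      · simp only [hmod, if_false, false_and, if_false]
        have hin : i < cs.length := by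
          rcases Nat.lt_or_ge i cs.length with h | h
          · exact h
          · exfalso; exact hmod (by rw [(by omega : i = cs.length)]; exact Nat.mod_self _)
        exact ih (i + 1) (by omega) (by omega) (by omega) ans

theorem altLoop_pos (cs : List Char) :
    ∀ fuel i, cs.length + 1 ≤ i + fuel → 0 < i → i ≤ cs.length → 1 ≤ altLoop cs i := by
  intro fuel
  induction fuel with
  | zero => intro i hfi hi hle; omega
  | succ f ih =>
      intro i hfi hi hle
      rw [altLoop]
      have hlt : i < cs.length + 1 := by omega
      simp only [hlt, if_true]
      split_ifs with hc
      · have : 1 ≤ cs.length / i := (Nat.one_le_div_iff hi).mpr hle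
        exact_mod_cast this
      · have hin : i < cs.length := by
          rcases Nat.lt_or_ge i cs.length with h | h
          · exact h
          · exfalso
            apply hc
            rw [(by omega : i = cs.length)]
            exact test_at_len cs (by omega)
        exact ih (i + 1) (by omega) (by omega) (by omega)

theorem fold_max_const (R : Int) (hR : 1 ≤ R) :
    ∀ k, 0 < k → (List.range k).foldl (fun a (_ : Nat) => max R a) (-1) = R := by
  intro k
  induction k with
  | zero => intro h; omega
  | succ m ih =>
      intro _
      rw [List.range_succ, List.foldl_append]
      rcases Nat.eq_zero_or_pos m with hm | hm
      · subst hm; simp; omega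
      · rw [ih hm]; simp

theorem solution_eq (s : String) : solution s = solution_alt s := by
  unfold solution solution_alt
  set cs := s.toList with hcs
  simp only [List.length_map, List.length_range]
  rcases Nat.eq_zero_or_pos cs.length with hn | hn
  · rw [hn]
    simp [hn]
  · rw [if_neg (by omega)]
    have hfun : (fun (ans : Int) (_j : Nat) => innerLoop cs 1 ans)
        = fun ans _j => max (altLoop cs 1) ans := by
      funext ans j
      exact inner_eq_max cs cs.length 1 (by omega) (by omega) hn ans
    rw [hfun]
    exact fold_max_const (altLoop cs 1)
      (altLoop_pos cs cs.length 1 (by omega) (by omega) hn) cs.length hn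

-- ===== VERDICT (by name: the statement is the Claim_ definition above) =====
theorem solution_spec : Claim_equal_solution := by
  intro s _hdom
  unfold Spec_solution
  exact solution_eq s
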